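-- pv_equiv track=rewrite | github.com/romain-laurent/genetic_load_project | analyse_Narasimhan_fig2/count_variants_fig2B.py | analyse_genos
-- ===== SOURCE A (Python) =====
-- def analyse_genos(line, idxs) :
--     nb_hom = 0
--     nb_alt = 0
--     for idx in idxs :
--         geno = line[idx]
--         if geno == '1/1' :
--             nb_hom += 1
--             nb_alt += 2
--         elif geno == '0/1' or geno == '1/0' :
--             nb_alt += 1
--     return nb_hom, nb_alt
-- ===== SOURCE B (Python) =====
-- def analyse_genos(line, idxs):
--     genos = [line[idx] for idx in idxs]
--     n11 = genos.count('1/1')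
--     return n11, 2 * n11 + genos.count('0/1') + genos.count('1/0')
-- ===== Notes on version B (the rewrite author's own statement) =====
-- stated objective: idiomatic
-- what changed: Replaces the per-element branch-and-accumulate loop with a tabulate-then-compute decomposition: select the genotypes once, count each genotype with list.count, and derive (nb_hom, nb_alt) by closed-form arithmetic from the counts.
import Mathlib
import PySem

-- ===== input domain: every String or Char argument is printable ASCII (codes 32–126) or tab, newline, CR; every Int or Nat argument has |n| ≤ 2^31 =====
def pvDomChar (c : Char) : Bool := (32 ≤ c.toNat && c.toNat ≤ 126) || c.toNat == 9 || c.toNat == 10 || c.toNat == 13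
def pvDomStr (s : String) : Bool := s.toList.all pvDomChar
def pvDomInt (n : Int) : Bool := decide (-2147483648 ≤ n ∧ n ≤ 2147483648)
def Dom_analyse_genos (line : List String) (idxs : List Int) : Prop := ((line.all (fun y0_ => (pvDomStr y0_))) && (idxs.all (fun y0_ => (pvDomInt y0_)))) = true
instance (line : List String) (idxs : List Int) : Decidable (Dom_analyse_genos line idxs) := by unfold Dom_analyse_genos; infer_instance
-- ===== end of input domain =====

-- B replaces A's branch-and-accumulate loop by selecting the genotypes once and deriving
-- both results arithmetically from list counts (objective: idiomatic tabulate-then-compute).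

-- ===== PORT A =====
-- A's loop over idxs accumulating (nb_hom, nb_alt); line[idx] via pyGet?
-- (none = IndexError, excluded by Pre_, so skipping none is exact on Pre_).
def analyse_genos (line : List String) (idxs : List Int) : Int × Int :=
  idxs.foldl
    (fun (s : Int × Int) idx =>
      match PySem.List.pyGet? line idx with
      | none => s
      | some geno =>
        if geno = "1/1" then (s.1 + 1, s.2 + 2)
        else if geno = "0/1" ∨ geno = "1/0" then (s.1, s.2 + 1)
        else s)
    (0, 0)

-- ===== PORT B =====
-- Source B: genos = [line[idx] for idx in idxs]; counts; closed-form arithmetic.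
-- (the comprehension raises on an out-of-range idx, excluded by Pre_; filterMap is exact there)
def analyse_genos_alt (line : List String) (idxs : List Int) : Int × Int :=
  let genos := idxs.filterMap (PySem.List.pyGet? line)
  let n11 : Int := genos.count "1/1"
  (n11, 2 * n11 + (genos.count "0/1" : Int) + (genos.count "1/0" : Int))

-- ===== PRECONDITION & SPEC =====
-- Pre_ excludes exactly the inputs where Python A raises IndexError (some idx out of range).
def Pre_analyse_genos (line : List String) (idxs : List Int) : Prop :=
  ∀ i ∈ idxs, PySem.Raise.InRange line.length i
instance (line : List String) (idxs : List Int) : Decidable (Pre_analyse_genos line idxs) := by unfold Pre_analyse_genos; infer_instance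
def pvWitness_analyse_genos : List String × List Int := (["1/1", "0/1", "0/0"], [0, 1, 2, -1])

def Spec_analyse_genos (line : List String) (idxs : List Int) (out : Int × Int) : Prop := out = analyse_genos_alt line idxs
instance (line : List String) (idxs : List Int) (out : Int × Int) : Decidable (Spec_analyse_genos line idxs out) := by unfold Spec_analyse_genos; infer_instance

-- ===== CLAIM (what is proved, stated in full; the proofs are below) =====
def Claim_equal_analyse_genos : Prop := ∀ (line : List String) (idxs : List Int), Dom_analyse_genos line idxs → Pre_analyse_genos line idxs → Spec_analyse_genos line idxs (analyse_genos line idxs)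

-- ===== LEMMAS AND PROOFS =====

-- A's fold from an arbitrary state equals that state shifted by B's counts of the selected genotypes.
theorem analyse_genos_fold_eq (line : List String) (idxs : List Int) (h a : Int) :
    idxs.foldl
      (fun (s : Int × Int) idx =>
        match PySem.List.pyGet? line idx with
        | none => s
        | some geno =>
          if geno = "1/1" then (s.1 + 1, s.2 + 2)
          else if geno = "0/1" ∨ geno = "1/0" then (s.1, s.2 + 1)
          else s)
      (h, a)
    = (h + ((idxs.filterMap (PySem.List.pyGet? line)).count "1/1" : Int),
       a + 2 * ((idxs.filterMap (PySem.List.pyGet? line)).count "1/1" : Int)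
         + ((idxs.filterMap (PySem.List.pyGet? line)).count "0/1" : Int)
         + ((idxs.filterMap (PySem.List.pyGet? line)).count "1/0" : Int)) := by
  induction idxs generalizing h a with
  | nil => simp
  | cons i t ih =>
    simp only [List.foldl_cons, List.filterMap_cons]
    cases hg : PySem.List.pyGet? line i with
    | none => simpa using ih h a
    | some g =>
      dsimp only
      by_cases h11 : g = "1/1"
      · subst h11
        rw [if_pos rfl, ih]
        simp
        constructor <;> ring
      · by_cases h01 : g = "0/1" ∨ g = "1/0"
        · rw [if_neg h11, if_pos h01, ih]
          rcases h01 with h01 | h01 <;> subst h01 <;>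
            · simp
              ring
        · rw [if_neg h11, if_neg h01, ih]
          rw [not_or] at h01
          simp [h11, h01.1, h01.2]

-- ===== VERDICT (by name: the statement is the Claim_ definition above) =====
theorem analyse_genos_spec : Claim_equal_analyse_genos := by
  intro line idxs _ _
  unfold Spec_analyse_genos analyse_genos analyse_genos_alt
  rw [analyse_genos_fold_eq]
  simp
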